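-- pv_equiv track=rewrite | github.com/TransouL/leetcode | 0757-set-intersection-size-at-least-two.py | intersectionSizeTwo
-- ===== SOURCE A (Python) =====
-- from typing import List
--
-- def intersectionSizeTwo(intervals: List[List[int]]) -> int:
--     intervals.sort(key=lambda x: (x[0], -x[1]))
--     ans, n, m = 0, len(intervals), 2
--     vars = [[] for _ in range(n)]
--     for i in range(n - 1, -1, -1):
--         j = intervals[i][0]
--         for k in range(len(vars[i]), m):
--             ans += 1
--             for p in range(i - 1, -1, -1):
--                 if intervals[p][1] < j:
--                     break
--                 vars[p].append(j)
--             j += 1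
--     return ans
-- ===== SOURCE B (Python) =====
-- def intersectionSizeTwo(intervals):
--     # Same sort (in place, like A); then a single sweep over the intervals in
--     # reverse, tracking only the two smallest chosen points instead of A's
--     # per-interval lists of propagated points.
--     intervals.sort(key=lambda x: (x[0], -x[1]))
--     ans = 0
--     u = v = None  # the two smallest chosen points so far, u <= v
--     for itv in reversed(intervals):
--         s, e = itv[0], itv[1]
--         if v is not None and e >= v:
--             continue
--         if u is not None and e >= u:
--             ans += 1
--             u, v = s, u
--         else:
--             ans += 2
--             u, v = s, s + 1
--     return ans
-- ===== Notes on version B (the rewrite author's own statement) =====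
-- stated objective: alternative
-- what changed: A's per-interval point lists ('vars') with a backward propagation scan (with break) for every chosen point are replaced by a single reverse sweep that keeps only the two smallest chosen points and adds 0/1/2 new points per interval; B sorts the list in place exactly like A (same observable mutation), and the equivalence proved is about the return value.
import Mathlib
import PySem

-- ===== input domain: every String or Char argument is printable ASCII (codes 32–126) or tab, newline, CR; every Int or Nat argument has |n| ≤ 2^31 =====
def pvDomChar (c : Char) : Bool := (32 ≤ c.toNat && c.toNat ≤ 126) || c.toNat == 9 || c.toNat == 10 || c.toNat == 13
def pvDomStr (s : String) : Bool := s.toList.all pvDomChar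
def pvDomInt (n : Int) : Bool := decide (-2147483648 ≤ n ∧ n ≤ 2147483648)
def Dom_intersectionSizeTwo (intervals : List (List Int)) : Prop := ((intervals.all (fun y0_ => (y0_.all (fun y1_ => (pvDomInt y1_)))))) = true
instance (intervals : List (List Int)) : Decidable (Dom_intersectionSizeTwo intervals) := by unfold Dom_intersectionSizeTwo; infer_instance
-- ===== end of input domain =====

-- B replaces A's per-interval point lists and propagation scans by one reverse sweep
-- keeping only the two smallest chosen points (objective: alternative algorithm).
-- Both A and B sort `intervals` in place (the same sort); the equivalence proved here is
-- about the RETURN value.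

-- ===== PORT A =====
-- sort key: lambda x: (x[0], -x[1]); x[0]/x[1] are in range under Pre_ (getD is exact there)
def pvKey1 (x : List Int) : Int := x.getD 0 0
def pvKey2 (x : List Int) : Int := -(x.getD 1 0)
-- intervals[i][0] and intervals[i][1] (exact under Pre_ for the indices the loops use)
def pvS (ivs : List (List Int)) (i : Nat) : Int := (ivs.getD i []).getD 0 0
def pvE (ivs : List (List Int)) (i : Nat) : Int := (ivs.getD i []).getD 1 0

-- inner loop: 'for p in range(i-1, -1, -1): if intervals[p][1] < j: break; vars[p].append(j)'
def propA (ivs : List (List Int)) (j : Int) : Nat → List (List Int) → List (List Int)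
  | 0, vars => vars
  | p+1, vars =>
      if pvE ivs p < j then vars
      else propA ivs j p (vars.set p ((vars.getD p []) ++ [j]))

-- middle loop: 'for k in range(len(vars[i]), m): ans += 1; <propagate j>; j += 1'
def innerA (ivs : List (List Int)) (i : Nat) : Nat → Int → Int × List (List Int) → Int × List (List Int)
  | 0, _, st => st
  | t+1, j, (ans, vars) => innerA ivs i t (j + 1) (ans + 1, propA ivs j i vars)

-- outer loop: 'for i in range(n-1, -1, -1)'
def outerA (ivs : List (List Int)) : Nat → Int × List (List Int) → Int × List (List Int)
  | 0, st => st
  | i+1, st => outerA ivs i (innerA ivs i (2 - ((st.2).getD i []).length) (pvS ivs i) st)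

def intersectionSizeTwo (intervals : List (List Int)) : Int :=
  let ivs := PySem.List.sorted2 intervals pvKey1 pvKey2
  (outerA ivs ivs.length (0, List.replicate ivs.length [])).1

-- ===== PORT B =====
-- one step of Source B's sweep: state (ans, two smallest chosen points u ≤ v or None)
def stepB (st : Int × Option (Int × Int)) (itv : List Int) : Int × Option (Int × Int) :=
  let s := itv.getD 0 0
  let e := itv.getD 1 0
  match st with
  | (ans, some (u, v)) =>
      if v ≤ e then (ans, some (u, v))
      else if u ≤ e then (ans + 1, some (s, u))
      else (ans + 2, some (s, s + 1))
  | (ans, none) => (ans + 2, some (s, s + 1))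

def intersectionSizeTwo_alt (intervals : List (List Int)) : Int :=
  let ivs := PySem.List.sorted2 intervals pvKey1 pvKey2
  (ivs.reverse.foldl stepB (0, none)).1

-- ===== PRECONDITION & SPEC =====
-- Pre_ excludes exactly the inputs where Python A raises (IndexError in the sort key /
-- body when some interval has fewer than 2 elements); B raises there too.
def Pre_intersectionSizeTwo (intervals : List (List Int)) : Prop :=
  ∀ l ∈ intervals, 2 ≤ l.length
instance (intervals : List (List Int)) : Decidable (Pre_intersectionSizeTwo intervals) := by
  unfold Pre_intersectionSizeTwo; infer_instance

def pvWitness_intersectionSizeTwo : List (List Int) := [[1, 3], [1, 4], [2, 5], [3, 5]]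

def Spec_intersectionSizeTwo (intervals : List (List Int)) (out : Int) : Prop := out = intersectionSizeTwo_alt intervals
instance (intervals : List (List Int)) (out : Int) : Decidable (Spec_intersectionSizeTwo intervals out) := by unfold Spec_intersectionSizeTwo; infer_instance

-- ===== CLAIM (what is proved, stated in full; the proofs are below) =====
def Claim_equal_intersectionSizeTwo : Prop := ∀ (intervals : List (List Int)), Dom_intersectionSizeTwo intervals → Pre_intersectionSizeTwo intervals → Spec_intersectionSizeTwo intervals (intersectionSizeTwo intervals)

-- ===== LEMMAS AND PROOFS =====

-- index form of B's sweep (processes indices i-1, i-2, …, 0, highest first)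
def sweepIdx (ivs : List (List Int)) : Nat → Int × Option (Int × Int) → Int × Option (Int × Int)
  | 0, st => st
  | i+1, st => sweepIdx ivs i (stepB st (ivs.getD i []))

lemma sweepIdx_cons (x : List Int) (xs : List (List Int)) :
    ∀ (i : Nat) (st : Int × Option (Int × Int)),
      sweepIdx (x :: xs) (i + 1) st = stepB (sweepIdx xs i st) x := by
  intro i
  induction i with
  | zero => intro st; rfl
  | succ i ih =>
      intro st
      show sweepIdx (x :: xs) (i + 1) (stepB st ((x :: xs).getD (i + 1) [])) = _
      rw [List.getD_cons_succ, ih]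
      rfl

lemma foldr_eq_sweepIdx (l : List (List Int)) (st : Int × Option (Int × Int)) :
    l.foldr (fun x acc => stepB acc x) st = sweepIdx l l.length st := by
  induction l with
  | nil => rfl
  | cons x xs ih => simp [List.foldr, ih, sweepIdx_cons]

-- 'the chosen point w has propagated from just above index i down into index p':
-- every end between p and i-1 (inclusive) is ≥ w
def chainB (ivs : List (List Int)) (p i : Nat) (w : Int) : Bool :=
  (List.range i).all (fun q => decide (q < p) || decide (w ≤ pvE ivs q))

lemma chainB_iff (ivs : List (List Int)) (p i : Nat) (w : Int) :
    chainB ivs p i w = true ↔ ∀ q, q < i → p ≤ q → w ≤ pvE ivs q := by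
  unfold chainB
  simp only [List.all_eq_true, List.mem_range, Bool.or_eq_true, decide_eq_true_eq]
  constructor
  · intro h q hq hpq
    rcases h q hq with h' | h'
    · omega
    · exact h'
  · intro h q hq
    by_cases hpq : p ≤ q
    · exact Or.inr (h q hq hpq)
    · exact Or.inl (by omega)

lemma chainB_mono (ivs : List (List Int)) (p i : Nat) {w w' : Int} (hww : w ≤ w')
    (h : chainB ivs p i w' = true) : chainB ivs p i w = true := by
  rw [chainB_iff] at h ⊢
  intro q hq hpq; exact le_trans hww (h q hq hpq)

lemma chainB_succ (ivs : List (List Int)) {p i : Nat} (hpi : p ≤ i) (w : Int) :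
    chainB ivs p (i + 1) w = (chainB ivs p i w && decide (w ≤ pvE ivs i)) := by
  rw [Bool.eq_iff_iff, Bool.and_eq_true, decide_eq_true_eq, chainB_iff, chainB_iff]
  constructor
  · intro h
    exact ⟨fun q hq hpq => h q (by omega) hpq, h i (by omega) hpi⟩
  · rintro ⟨h1, h2⟩ q hq hpq
    rcases Nat.lt_or_ge q i with h | h
    · exact h1 q h hpq
    · have hqi : q = i := by omega
      subst hqi; exact h2

lemma chainB_self (ivs : List (List Int)) (i : Nat) (w : Int) :
    chainB ivs i (i + 1) w = decide (w ≤ pvE ivs i) := by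
  rw [chainB_succ ivs (le_refl i) w]
  have : chainB ivs i i w = true := by
    rw [chainB_iff]; intro q hq hpq; omega
  rw [this, Bool.true_and]

-- effect of one propagation scan on the list at position p
lemma getD_set_ne' (l : List (List Int)) (i p : Nat) (a : List Int) (h : p ≠ i) :
    ((l.set i a).getD p []) = l.getD p [] := by
  rw [List.getD_eq_getElem?_getD, List.getD_eq_getElem?_getD, List.getElem?_set_ne (by omega)]

lemma getD_set_self' (l : List (List Int)) (i : Nat) (a : List Int) (h : i < l.length) :
    ((l.set i a).getD i []) = a := by
  rw [List.getD_eq_getElem?_getD, List.getElem?_set_self h]; rfl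

lemma propA_length (ivs : List (List Int)) (j : Int) :
    ∀ (i : Nat) (vars : List (List Int)), (propA ivs j i vars).length = vars.length := by
  intro i
  induction i with
  | zero => intro vars; rfl
  | succ i ih =>
      intro vars
      unfold propA
      split
      · rfl
      · rw [ih, List.length_set]

lemma propA_getD (ivs : List (List Int)) (j : Int) :
    ∀ (i : Nat) (vars : List (List Int)), i ≤ vars.length → ∀ (p : Nat),
      (propA ivs j i vars).getD p [] =
        if p < i ∧ chainB ivs p i j = true then (vars.getD p []) ++ [j] else vars.getD p [] := by
  intro i
  induction i with
  | zero =>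
      intro vars _ p
      simp [propA]
  | succ i ih =>
      intro vars hlen p
      unfold propA
      split
      · rename_i hbreak
        -- break: e_i < j, nothing changed; chainB p (i+1) j must fail for p ≤ i
        symm
        rw [if_neg]
        rintro ⟨hp, hch⟩
        rw [chainB_iff] at hch
        have := hch i (by omega) (by omega)
        omega
      · rename_i hbreak'
        have hbreak : j ≤ pvE ivs i := by omega
        have hset : (vars.set i ((vars.getD i []) ++ [j])).length = vars.length := List.length_set ..
        rw [ih _ (by omega) p]
        by_cases hp : p < i
        · have hne : p ≠ i := by omega
          rw [getD_set_ne' _ _ _ _ (by omega)]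
          have hch : chainB ivs p (i+1) j = chainB ivs p i j := by
            rw [chainB_succ ivs (by omega) j, decide_eq_true hbreak, Bool.and_true]
          rw [hch]
          simp [hp, Nat.lt_succ_of_lt hp]
        · by_cases hpi : p = i
          · subst hpi
            have hfalse : ¬ p < p := lt_irrefl p
            rw [if_neg (by intro h; exact hfalse h.1)]
            rw [getD_set_self' _ _ _ (by omega)]
            rw [if_pos ⟨by omega, by rw [chainB_self, decide_eq_true_eq]; exact hbreak⟩]
          · -- p > i: untouched
            rw [getD_set_ne' _ _ _ _ (by omega)]
            rw [if_neg (by intro h; omega), if_neg (by intro h; omega)]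

-- number of tracked points that have propagated into index p (what min(len vars[p], 2) equals)
def cnt (ivs : List (List Int)) (uv : Option (Int × Int)) (p i : Nat) : Nat :=
  match uv with
  | none => 0
  | some (u, v) => if chainB ivs p i v then 2 else if chainB ivs p i u then 1 else 0

-- the simulation invariant tying A's vars state to B's register state
def SimInv (ivs : List (List Int)) (i : Nat) (vars : List (List Int)) (uv : Option (Int × Int)) : Prop :=
  vars.length = ivs.length ∧ i ≤ ivs.length ∧
  (∀ p, p < i → min ((vars.getD p []).length) 2 = cnt ivs uv p i) ∧
  (∀ u v, uv = some (u, v) → u ≤ v ∧ ∀ p, p < i → pvS ivs p ≤ u)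

lemma cnt_some (ivs : List (List Int)) (u v : Int) (p i : Nat) :
    cnt ivs (some (u, v)) p i
      = if chainB ivs p i v then 2 else if chainB ivs p i u then 1 else 0 := rfl

lemma stepB_none (ans : Int) (itv : List Int) :
    stepB (ans, none) itv = (ans + 2, some (itv.getD 0 0, itv.getD 0 0 + 1)) := rfl

lemma stepB_some (ans u v : Int) (itv : List Int) :
    stepB (ans, some (u, v)) itv
      = if v ≤ itv.getD 1 0 then (ans, some (u, v))
        else if u ≤ itv.getD 1 0 then (ans + 1, some (itv.getD 0 0, u))
        else (ans + 2, some (itv.getD 0 0, itv.getD 0 0 + 1)) := rfl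

lemma main_sim (ivs : List (List Int))
    (hs : ∀ p q, p ≤ q → q < ivs.length → pvS ivs p ≤ pvS ivs q) :
    ∀ (i : Nat) (ans : Int) (vars : List (List Int)) (uv : Option (Int × Int)),
      SimInv ivs i vars uv →
      (outerA ivs i (ans, vars)).1 = (sweepIdx ivs i (ans, uv)).1 := by
  intro i
  induction i with
  | zero => intro ans vars uv _; rfl
  | succ i ih =>
      intro ans vars uv hInv
      obtain ⟨hlen, hile, hcnt, hord⟩ := hInv
      have hstep : (ivs.getD i []).getD 0 0 = pvS ivs i := rfl
      have hstepE : (ivs.getD i []).getD 1 0 = pvE ivs i := rfl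
      have hci := hcnt i (by omega)
      set s := pvS ivs i with hsdef
      set L := ((vars.getD i []).length) with hL
      have houter : outerA ivs (i+1) (ans, vars)
          = outerA ivs i (innerA ivs i (2 - L) s (ans, vars)) := rfl
      have hsweep : sweepIdx ivs (i+1) (ans, uv)
          = sweepIdx ivs i (stepB (ans, uv) (ivs.getD i [])) := rfl
      rw [houter, hsweep]
      match uv with
      | none =>
          -- no points yet: cnt = 0, so L = 0, two points s, s+1 chosen
          have hL0 : L = 0 := by
            have h' : min L 2 = 0 := hci
            omega
          have hinner : innerA ivs i (2 - L) s (ans, vars)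
              = (ans + 1 + 1, propA ivs (s+1) i (propA ivs s i vars)) := by
            rw [hL0]; rfl
          have hstepB : stepB (ans, (none : Option (Int × Int))) (ivs.getD i [])
              = (ans + 2, some (s, s + 1)) := by
            rw [stepB_none, hstep]
          rw [hinner, hstepB]
          have hans : ans + 1 + 1 = ans + 2 := by ring
          rw [hans]
          apply ih
          -- establish SimInv i for the new state
          refine ⟨?_, by omega, ?_, ?_⟩
          · rw [propA_length, propA_length, hlen]
          · intro p hp
            have hlen1 : i ≤ (propA ivs s i vars).length := by rw [propA_length]; omega
            rw [propA_getD ivs (s+1) i _ hlen1 p, propA_getD ivs s i vars (by omega) p]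
            have hp0 : (vars.getD p []).length = 0 := by
              have h' : min ((vars.getD p []).length) 2 = 0 := hcnt p (by omega)
              omega
            rw [cnt_some]
            by_cases h1 : chainB ivs p i (s+1) = true
            · have h0 : chainB ivs p i s = true := chainB_mono ivs p i (by omega) h1
              rw [if_pos ⟨hp, h1⟩, if_pos ⟨hp, h0⟩, if_pos h1]
              simp only [List.length_append, List.length_cons, List.length_nil]
              omega
            · rw [if_neg (fun h => h1 h.2), if_neg h1]
              by_cases h0 : chainB ivs p i s = true
              · rw [if_pos ⟨hp, h0⟩, if_pos h0]
                simp only [List.length_append, List.length_cons, List.length_nil]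
                omega
              · rw [if_neg (fun h => h0 h.2), if_neg h0]
                omega
          · intro u' v' huv'
            injection huv' with h'
            injection h' with h1 h2
            subst h1; subst h2
            refine ⟨by omega, ?_⟩
            intro p hp
            exact hs p i (by omega) (by omega)
      | some (u, v) =>
          obtain ⟨huv, hsle⟩ := hord u v rfl
          have hchu : chainB ivs i (i+1) u = decide (u ≤ pvE ivs i) := chainB_self ..
          have hchv : chainB ivs i (i+1) v = decide (v ≤ pvE ivs i) := chainB_self ..
          by_cases hv : v ≤ pvE ivs i
          · -- both tracked points cover this interval: nothing happens on either side
            have hu : u ≤ pvE ivs i := le_trans huv hv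
            have hL2 : 2 ≤ L := by
              have h' : min L 2 = 2 := by
                rw [hci, cnt_some, hchv]
                simp [hv]
              omega
            have hinner : innerA ivs i (2 - L) s (ans, vars) = (ans, vars) := by
              have h2 : 2 - L = 0 := by omega
              rw [h2]; rfl
            have hstepB : stepB (ans, some (u, v)) (ivs.getD i []) = (ans, some (u, v)) := by
              rw [stepB_some, hstepE, if_pos hv]
            rw [hinner, hstepB]
            apply ih
            refine ⟨hlen, by omega, ?_, ?_⟩
            · intro p hp
              rw [hcnt p (by omega), cnt_some, cnt_some,
                chainB_succ ivs (by omega : p ≤ i) v, chainB_succ ivs (by omega : p ≤ i) u,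
                decide_eq_true hv, decide_eq_true hu, Bool.and_true, Bool.and_true]
            · intro u' v' huv'
              injection huv' with h'
              injection h' with h1 h2
              subst h1; subst h2
              exact ⟨huv, fun p hp => hsle p (by omega)⟩
          · by_cases hu : u ≤ pvE ivs i
            · -- exactly one tracked point covers: one new point s
              have hL1 : L = 1 := by
                have h' : min L 2 = 1 := by
                  rw [hci, cnt_some, hchv, hchu]
                  simp [hv, hu]
                omega
              have hinner : innerA ivs i (2 - L) s (ans, vars)
                  = (ans + 1, propA ivs s i vars) := by
                rw [hL1]; rfl
              have hstepB : stepB (ans, some (u, v)) (ivs.getD i [])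
                  = (ans + 1, some (s, u)) := by
                rw [stepB_some, hstepE, hstep, if_neg hv, if_pos hu]
              rw [hinner, hstepB]
              apply ih
              refine ⟨by rw [propA_length, hlen], by omega, ?_, ?_⟩
              · intro p hp
                rw [propA_getD ivs s i vars (by omega) p]
                have hold := hcnt p (by omega)
                have hchpv : chainB ivs p (i+1) v = false := by
                  rw [chainB_succ ivs (by omega : p ≤ i) v]
                  simp [hv]
                have hchpu : chainB ivs p (i+1) u = chainB ivs p i u := by
                  rw [chainB_succ ivs (by omega : p ≤ i) u, decide_eq_true hu, Bool.and_true]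
                rw [cnt_some, hchpv, hchpu] at hold
                simp only [Bool.false_eq_true, if_false] at hold
                have hsu : s ≤ u := hsle i (by omega)
                rw [cnt_some]
                by_cases hcs : chainB ivs p i s = true
                · rw [if_pos ⟨hp, hcs⟩, if_pos hcs]
                  by_cases hcu : chainB ivs p i u = true
                  · rw [if_pos hcu]
                    rw [if_pos hcu] at hold
                    simp only [List.length_append, List.length_cons, List.length_nil]
                    omega
                  · rw [if_neg hcu]
                    rw [if_neg hcu] at hold
                    simp only [List.length_append, List.length_cons, List.length_nil]
                    omega
                · have hcu : ¬ chainB ivs p i u = true := by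
                    intro hcu
                    exact hcs (chainB_mono ivs p i hsu hcu)
                  rw [if_neg (fun h => hcs h.2), if_neg hcs, if_neg hcu]
                  rw [if_neg hcu] at hold
                  omega
              · intro u' v' huv'
                injection huv' with h'
                injection h' with h1 h2
                subst h1; subst h2
                refine ⟨hsle i (by omega), fun p hp => hs p i (by omega) (by omega)⟩
            · -- no tracked point covers: two new points s, s+1
              have hL0 : L = 0 := by
                have h' : min L 2 = 0 := by
                  rw [hci, cnt_some, hchv, hchu]
                  simp [hv, hu]
                omega
              have hinner : innerA ivs i (2 - L) s (ans, vars)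
                  = (ans + 1 + 1, propA ivs (s+1) i (propA ivs s i vars)) := by
                rw [hL0]; rfl
              have hstepB : stepB (ans, some (u, v)) (ivs.getD i [])
                  = (ans + 2, some (s, s + 1)) := by
                rw [stepB_some, hstepE, hstep, if_neg hv, if_neg hu]
              rw [hinner, hstepB]
              have hans : ans + 1 + 1 = ans + 2 := by ring
              rw [hans]
              apply ih
              refine ⟨?_, by omega, ?_, ?_⟩
              · rw [propA_length, propA_length, hlen]
              · intro p hp
                have hlen1 : i ≤ (propA ivs s i vars).length := by rw [propA_length]; omega
                rw [propA_getD ivs (s+1) i _ hlen1 p, propA_getD ivs s i vars (by omega) p]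
                -- the old count here is 0: both chains die at e_i < u ≤ v
                have hold := hcnt p (by omega)
                have hchpv : chainB ivs p (i+1) v = false := by
                  rw [chainB_succ ivs (by omega : p ≤ i) v]; simp [hv]
                have hchpu : chainB ivs p (i+1) u = false := by
                  rw [chainB_succ ivs (by omega : p ≤ i) u]; simp [hu]
                rw [cnt_some, hchpv, hchpu] at hold
                simp only [Bool.false_eq_true, if_false] at hold
                have hp0 : (vars.getD p []).length = 0 := by omega
                rw [cnt_some]
                by_cases h1 : chainB ivs p i (s+1) = true
                · have h0 : chainB ivs p i s = true := chainB_mono ivs p i (by omega) h1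
                  rw [if_pos ⟨hp, h1⟩, if_pos ⟨hp, h0⟩, if_pos h1]
                  simp only [List.length_append, List.length_cons, List.length_nil]
                  omega
                · rw [if_neg (fun h => h1 h.2), if_neg h1]
                  by_cases h0 : chainB ivs p i s = true
                  · rw [if_pos ⟨hp, h0⟩, if_pos h0]
                    simp only [List.length_append, List.length_cons, List.length_nil]
                    omega
                  · rw [if_neg (fun h => h0 h.2), if_neg h0]
                    omega
              · intro u' v' huv'
                injection huv' with h'
                injection h' with h1 h2
                subst h1; subst h2
                refine ⟨by omega, fun p hp => hs p i (by omega) (by omega)⟩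

-- pairwise order on the first key for the insertion sort behind sorted2
lemma insertBy_cons (before : List Int → List Int → Bool) (x y : List Int) (ys : List (List Int)) :
    PySem.List.insertBy before x (y :: ys)
      = if before x y = true then x :: y :: ys else y :: PySem.List.insertBy before x ys := rfl

lemma insertBy_pairwise (before : List Int → List Int → Bool) (x : List Int)
    (h1 : ∀ y, before x y = true → pvKey1 x ≤ pvKey1 y)
    (h2 : ∀ y, before x y = false → pvKey1 y ≤ pvKey1 x) :
    ∀ (ys : List (List Int)), ys.Pairwise (fun a b => pvKey1 a ≤ pvKey1 b) →
      (PySem.List.insertBy before x ys).Pairwise (fun a b => pvKey1 a ≤ pvKey1 b) := by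
  intro ys
  induction ys with
  | nil => intro _; simp [PySem.List.insertBy]
  | cons y ys ih =>
      intro hp
      rw [List.pairwise_cons] at hp
      obtain ⟨hy, hys⟩ := hp
      rw [insertBy_cons]
      split
      · rename_i hb
        rw [List.pairwise_cons]
        constructor
        · intro z hz
          rcases List.mem_cons.mp hz with h | h
          · rw [h]; exact h1 y hb
          · exact le_trans (h1 y hb) (hy z h)
        · rw [List.pairwise_cons]; exact ⟨hy, hys⟩
      · rename_i hb
        rw [Bool.not_eq_true] at hb
        rw [List.pairwise_cons]
        constructor
        · intro z hz
          rcases (PySem.List.mem_insertBy before x z ys).mp hz with h | h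
          · rw [h]; exact h2 y hb
          · exact hy z h
        · exact ih hys

lemma foldl_insertBy_pairwise (before : List Int → List Int → Bool)
    (h1 : ∀ x y, before x y = true → pvKey1 x ≤ pvKey1 y)
    (h2 : ∀ x y, before x y = false → pvKey1 y ≤ pvKey1 x) :
    ∀ (xs acc : List (List Int)), acc.Pairwise (fun a b => pvKey1 a ≤ pvKey1 b) →
      (List.foldl (fun acc x => PySem.List.insertBy before x acc) acc xs).Pairwise
        (fun a b => pvKey1 a ≤ pvKey1 b) := by
  intro xs
  induction xs with
  | nil => intro acc h; exact h
  | cons x xs ih =>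
      intro acc h
      rw [List.foldl_cons]
      exact ih _ (insertBy_pairwise before x (h1 x) (h2 x) acc h)

lemma sorted2_pairwise_key1 (xs : List (List Int)) :
    (PySem.List.sorted2 xs pvKey1 pvKey2).Pairwise (fun a b => pvKey1 a ≤ pvKey1 b) := by
  have hdef : PySem.List.sorted2 xs pvKey1 pvKey2
      = xs.foldl (fun acc x => PySem.List.insertBy
          (fun a b => decide (pvKey1 a < pvKey1 b)
            || (!decide (pvKey1 b < pvKey1 a) && decide (pvKey2 a < pvKey2 b))) x acc) [] := rfl
  rw [hdef]
  apply foldl_insertBy_pairwise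
  · intro x y hb
    simp only [Bool.or_eq_true, Bool.and_eq_true, decide_eq_true_eq] at hb
    rcases hb with h | ⟨h, _⟩
    · exact le_of_lt h
    · rw [Bool.not_eq_true', decide_eq_false_iff_not, not_lt] at h
      exact h
  · intro x y hb
    rw [Bool.or_eq_false_iff] at hb
    obtain ⟨hb1, _⟩ := hb
    rw [decide_eq_false_iff_not, not_lt] at hb1
    exact hb1
  · simp

lemma sorted_starts (ivs : List (List Int))
    (hp : ivs.Pairwise (fun a b => pvKey1 a ≤ pvKey1 b)) :
    ∀ p q, p ≤ q → q < ivs.length → pvS ivs p ≤ pvS ivs q := by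
  intro p q hpq hq
  rcases Nat.lt_or_ge p q with hlt | hge
  · have := (List.pairwise_iff_getElem).mp hp p q (by omega) hq hlt
    have hgp : ivs.getD p [] = ivs[p] := List.getD_eq_getElem ivs [] (by omega)
    have hgq : ivs.getD q [] = ivs[q] := List.getD_eq_getElem ivs [] hq
    unfold pvS
    rw [hgp, hgq]
    exact this
  · have : p = q := by omega
    subst this; exact le_refl _

-- ===== VERDICT (by name: the statement is the Claim_ definition above) =====
theorem intersectionSizeTwo_spec : Claim_equal_intersectionSizeTwo := by
  intro intervals _ _
  unfold Spec_intersectionSizeTwo intersectionSizeTwo intersectionSizeTwo_alt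
  set ivs := PySem.List.sorted2 intervals pvKey1 pvKey2 with hivs
  have hrev : ivs.reverse.foldl stepB ((0 : Int), (none : Option (Int × Int)))
      = sweepIdx ivs ivs.length (0, none) := by
    rw [List.foldl_reverse, foldr_eq_sweepIdx]
  show (outerA ivs ivs.length (0, List.replicate ivs.length [])).1
      = (ivs.reverse.foldl stepB (0, none)).1
  rw [hrev]
  apply main_sim ivs (sorted_starts ivs (sorted2_pairwise_key1 intervals))
  refine ⟨List.length_replicate, le_refl _, ?_, by simp⟩
  intro p hp
  have hrep : (List.replicate ivs.length ([] : List Int)).getD p [] = [] := by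
    rw [List.getD_eq_getElem?_getD, List.getElem?_replicate]
    split <;> rfl
  rw [hrep]
  rfl
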